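-- pv_equiv track=rewrite | github.com/poezio/poezio | poezio/common.py | _find_argument_unquoted
-- ===== SOURCE A (Python) =====
-- def _find_argument_unquoted(pos: int, text: str) -> int:
--     """
--     Get the number of the argument at position pos in
--     a string without interpreting quotes.
--     """
--     ret = text.split()
--     search = 0
--     argnum = 0
--     for i, elem in enumerate(ret):
--         elem_start = text.find(elem, search)
--         elem_end = elem_start + len(elem)
--         search = elem_end
--         if elem_start <= pos < elem_end:
--             return i
--         argnum = i
--     return argnum + 1
-- ===== SOURCE B (Python) =====
-- def _find_argument_unquoted(pos: int, text: str) -> int: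
--     word_count = 0
--     prev_space = True
--     for i, ch in enumerate(text):
--         if ch.isspace():
--             prev_space = True
--         else:
--             if prev_space:
--                 word_count += 1
--             prev_space = False
--             if i == pos:
--                 return word_count - 1
--     return word_count or 1
-- ===== Notes on version B (the rewrite author's own statement) =====
-- stated objective: simpler
-- what changed: Replaced split() plus repeated text.find re-scans with a single character-by-character pass maintaining a word counter and a previous-char-was-whitespace flag; 'word_count or 1' naturally yields A's return of 1 on empty/all-whitespace input.
import Mathlib
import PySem

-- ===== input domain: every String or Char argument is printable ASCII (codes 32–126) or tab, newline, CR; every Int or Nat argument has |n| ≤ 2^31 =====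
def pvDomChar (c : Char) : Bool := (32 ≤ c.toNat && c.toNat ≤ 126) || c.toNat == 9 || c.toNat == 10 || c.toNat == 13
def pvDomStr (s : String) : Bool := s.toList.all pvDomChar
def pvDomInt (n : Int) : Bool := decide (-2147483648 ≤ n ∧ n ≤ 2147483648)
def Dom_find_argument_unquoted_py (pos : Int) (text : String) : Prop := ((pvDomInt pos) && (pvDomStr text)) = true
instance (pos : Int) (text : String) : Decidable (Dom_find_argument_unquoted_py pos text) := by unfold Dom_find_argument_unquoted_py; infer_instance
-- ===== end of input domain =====

-- B replaces A's split() + repeated text.find re-scans with a single character scan (word counter + previous-char-was-space flag); objective: simpler.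

-- ===== PORT A =====
-- the 'for i, elem in enumerate(ret)' loop with early return; state (i, search, argnum)
def pvALoop (pos : Int) (text : List Char) (ws : List (List Char)) (i : Int)
    (search : Int) (argnum : Int) : Int :=
  match ws with
  | [] => argnum + 1
  | w :: rest =>
    let elem_start := PySem.Chars.findFrom text w search none
    let elem_end := elem_start + w.length
    if elem_start ≤ pos ∧ pos < elem_end then i
    else pvALoop pos text rest (i + 1) elem_end i

def find_argument_unquoted_py (pos : Int) (text : String) : Int :=
  pvALoop pos text.toList (PySem.Chars.split₀ text.toList) 0 0 0

-- ===== PORT B =====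
-- the 'for i, ch in enumerate(text)' scan; state (i, word_count, prev_space)
def pvBScan (pos : Int) (cs : List Char) (i : Nat) (wc : Int) (prevSpace : Bool) : Int :=
  match cs with
  | [] => if wc = 0 then 1 else wc          -- 'return word_count or 1'
  | c :: rest =>
    if PySem.Chars.isspace c then pvBScan pos rest (i + 1) wc true
    else
      let wc' := if prevSpace then wc + 1 else wc
      if (i : Int) = pos then wc' - 1 else pvBScan pos rest (i + 1) wc' false

def find_argument_unquoted_py_alt (pos : Int) (text : String) : Int :=
  pvBScan pos text.toList 0 0 true

-- ===== PRECONDITION & SPEC =====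
def Spec_find_argument_unquoted_py (pos : Int) (text : String) (out : Int) : Prop := out = find_argument_unquoted_py_alt pos text
instance (pos : Int) (text : String) (out : Int) : Decidable (Spec_find_argument_unquoted_py pos text out) := by unfold Spec_find_argument_unquoted_py; infer_instance

-- ===== CLAIM (what is proved, stated in full; the proofs are below) =====
def Claim_equal_find_argument_unquoted_py : Prop := ∀ (pos : Int) (text : String), Dom_find_argument_unquoted_py pos text → Spec_find_argument_unquoted_py pos text (find_argument_unquoted_py pos text)

-- ===== LEMMAS AND PROOFS =====

theorem go_nil (cur : List Char) (acc : List (List Char)) :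
    PySem.Chars.split₀.go [] cur acc =
      (if cur.isEmpty then acc.reverse else (cur.reverse :: acc).reverse) := rfl

theorem go_cons (c : Char) (rest cur : List Char) (acc : List (List Char)) :
    PySem.Chars.split₀.go (c :: rest) cur acc =
      (if PySem.Chars.isspace c then
        (if cur.isEmpty then PySem.Chars.split₀.go rest [] acc
         else PySem.Chars.split₀.go rest [] (cur.reverse :: acc))
       else PySem.Chars.split₀.go rest (c :: cur) acc) := rfl

theorem go_acc (cs : List Char) : ∀ (cur : List Char) (acc : List (List Char)),
    PySem.Chars.split₀.go cs cur acc = acc.reverse ++ PySem.Chars.split₀.go cs cur [] := by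
  induction cs with
  | nil => intro cur acc; rw [go_nil, go_nil]; split <;> simp
  | cons c rest ih =>
    intro cur acc
    rw [go_cons, go_cons]
    split
    · split
      · exact ih [] acc
      · rw [ih [] (cur.reverse :: acc), ih [] [cur.reverse]]; simp
    · exact ih (c :: cur) acc

theorem split₀_nil : PySem.Chars.split₀ [] = [] := rfl

theorem split₀_space_cons {c : Char} (h : PySem.Chars.isspace c = true) (cs : List Char) :
    PySem.Chars.split₀ (c :: cs) = PySem.Chars.split₀ cs := by
  unfold PySem.Chars.split₀; rw [go_cons]; simp [h]

theorem go_word (w : List Char) : ∀ (cs cur : List Char) (acc : List (List Char)),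
    (∀ c ∈ w, PySem.Chars.isspace c = false) →
    PySem.Chars.split₀.go (w ++ cs) cur acc = PySem.Chars.split₀.go cs (w.reverse ++ cur) acc := by
  induction w with
  | nil => intro cs cur acc _; simp
  | cons c w ih =>
    intro cs cur acc h
    rw [List.cons_append, go_cons]
    simp only [h c (by simp)]
    rw [ih cs (c :: cur) acc (fun x hx => h x (by simp [hx]))]
    simp

theorem split₀_word {w rest : List Char} (hw : w ≠ [])
    (hns : ∀ c ∈ w, PySem.Chars.isspace c = false)
    (hrest : rest = [] ∨ ∃ d r, rest = d :: r ∧ PySem.Chars.isspace d = true) :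
    PySem.Chars.split₀ (w ++ rest) = w :: PySem.Chars.split₀ rest := by
  unfold PySem.Chars.split₀
  rw [go_word w rest [] [] hns]
  rcases hrest with h | ⟨d, r, rfl, hd⟩
  · subst h; rw [go_nil, go_nil]; simp [hw]
  · rw [go_cons d r (w.reverse ++ []) [], go_cons d r [] []]
    rw [if_pos hd, if_pos hd, if_neg (by simp [hw]), if_pos (by simp)]
    rw [go_acc r]
    simp

theorem bscan_word' (pos : Int) (w : List Char)
    (hns : ∀ c ∈ w, PySem.Chars.isspace c = false) :
    ∀ (rest : List Char) (k : Nat) (wc : Int),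
    pvBScan pos (w ++ rest) k wc false =
      if (k : Int) ≤ pos ∧ pos < (k : Int) + w.length then wc - 1
      else pvBScan pos rest (k + w.length) wc false := by
  induction w with
  | nil =>
    intro rest k wc
    rw [List.nil_append, if_neg (by simp)]
    simp
  | cons c w ih =>
    intro rest k wc
    rw [List.cons_append]
    conv_lhs => unfold pvBScan
    rw [if_neg (by simp [hns c (by simp)])]
    simp only [Bool.false_eq_true, if_false]
    rw [ih (fun x hx => hns x (by simp [hx])) rest (k + 1) wc]
    have hk : k + 1 + w.length = k + (w.length + 1) := by omega
    rw [hk]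
    have hc1 : ((k + 1 : Nat) : Int) = (k : Int) + 1 := by push_cast; ring
    have hl : ((c :: w).length : Int) = (w.length : Int) + 1 := by simp
    split_ifs with h1 h2 h3 h4 h5 <;> simp_all <;> omega

theorem find_space_word (sp : List Char) (hsp : ∀ c ∈ sp, PySem.Chars.isspace c = true)
    (c : Char) (hc : PySem.Chars.isspace c = false) (w r : List Char) :
    PySem.Chars.find (sp ++ (c :: w) ++ r) (c :: w) = sp.length := by
  have hinf : (c :: w) <:+: (sp ++ (c :: w) ++ r) := ⟨sp, r, by simp⟩
  have hpos : 0 ≤ PySem.Chars.find (sp ++ (c :: w) ++ r) (c :: w) := by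
    have h1 := PySem.Chars.neg_one_le_find (sp ++ (c :: w) ++ r) (c :: w)
    have h2 := (PySem.Chars.find_ne_neg_one_iff (s := sp ++ (c :: w) ++ r) (sub := c :: w)).mpr hinf
    omega
  obtain ⟨hpre, hmin⟩ := PySem.Chars.find_spec hpos
  have hat : (c :: w) <+: (sp ++ (c :: w) ++ r).drop sp.length := by
    rw [List.append_assoc, List.drop_left]
    exact ⟨r, rfl⟩
  set n := (PySem.Chars.find (sp ++ (c :: w) ++ r) (c :: w)).toNat with hn
  have hle : n ≤ sp.length := by
    by_contra h
    exact absurd hat (hmin sp.length (by omega))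
  have hge : sp.length ≤ n := by
    by_contra h
    replace h : n < sp.length := by omega
    have hdrop : (sp ++ (c :: w) ++ r).drop n = sp[n] :: (sp.drop (n + 1) ++ ((c :: w) ++ r)) := by
      conv_lhs => rw [List.append_assoc, List.drop_append_of_le_length (by omega),
        List.drop_eq_getElem_cons (show n < sp.length by omega)]
      simp only [List.cons_append]
    rw [hdrop] at hpre
    obtain ⟨t, ht⟩ := hpre
    have hcc : c = sp[n] := by
      have := ht
      simp at this
      exact this.1
    have := hsp sp[n] (by simp)
    rw [← hcc] at this
    simp [hc] at this
  have hfin : n = sp.length := le_antisymm hle hge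
  omega

theorem dropWhile_head_false {p : Char → Bool} {l : List Char} {d : Char} {t : List Char}
    (h : l.dropWhile p = d :: t) : p d = false := by
  have := List.head_dropWhile_not p (l := l) (by rw [h]; simp)
  simp only [h, List.head_cons] at this
  exact this

theorem bscan_space (pos : Int) {c : Char} (h : PySem.Chars.isspace c = true)
    (rest : List Char) (k : Nat) (wc : Int) (b : Bool) :
    pvBScan pos (c :: rest) k wc b = pvBScan pos rest (k + 1) wc true := by
  conv_lhs => unfold pvBScan
  rw [if_pos h]

theorem bscan_word (pos : Int) (c : Char) (w : List Char)
    (hns : ∀ x ∈ c :: w, PySem.Chars.isspace x = false) (rest : List Char) (k : Nat) (wc : Int) :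
    pvBScan pos ((c :: w) ++ rest) k wc true =
      if (k : Int) ≤ pos ∧ pos < (k : Int) + ((c :: w).length : Int) then wc
      else pvBScan pos rest (k + (c :: w).length) (wc + 1) false := by
  rw [List.cons_append]
  conv_lhs => unfold pvBScan
  rw [if_neg (by simp [hns c (by simp)])]
  simp only [if_true]
  rw [bscan_word' pos w (fun x hx => hns x (by simp [hx])) rest (k + 1) (wc + 1)]
  have hl : ((c :: w).length : Int) = (w.length : Int) + 1 := by simp
  have hk : k + 1 + w.length = k + (w.length + 1) := by omega
  rw [hk]
  have hc1 : ((k + 1 : Nat) : Int) = (k : Int) + 1 := by push_cast; ring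
  split_ifs with h1 h2 h3 <;> simp_all <;> omega

theorem pv_main (pos : Int) (text : List Char) :
    ∀ (n : Nat) (cs : List Char), cs.length = n →
    ∀ (s : Nat) (sp : List Char) (i : Nat),
      text.drop s = sp ++ cs → (∀ c ∈ sp, PySem.Chars.isspace c = true) →
      pvALoop pos text (PySem.Chars.split₀ cs) (i : Int) (s : Int)
          (if i = 0 then 0 else (i : Int) - 1)
        = pvBScan pos cs (s + sp.length) (i : Int) true := by
  intro n
  induction n using Nat.strong_induction_on with
  | _ n ih =>
  intro cs hlen s sp i hdrop hsp
  match cs, hlen with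
  | [], _ =>
    rw [split₀_nil]
    unfold pvALoop pvBScan
    by_cases hi : i = 0 <;> simp [hi]
  | c :: rest, hlen =>
    by_cases hc : PySem.Chars.isspace c = true
    · rw [split₀_space_cons hc, bscan_space pos hc]
      have h1 : text.drop s = (sp ++ [c]) ++ rest := by rw [hdrop]; simp
      have h2 : ∀ x ∈ sp ++ [c], PySem.Chars.isspace x = true := by
        intro x hx
        rcases List.mem_append.1 hx with h | h
        · exact hsp x h
        · simp at h; subst h; exact hc
      have := ih rest.length (by simp at hlen; omega) rest rfl s (sp ++ [c]) i h1 h2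
      simpa [Nat.add_assoc] using this
    · -- word case
      have hcb : PySem.Chars.isspace c = false := by simpa using hc
      set p : Char → Bool := fun x => !PySem.Chars.isspace x with hp
      set wt : List Char := List.takeWhile p rest with hwt
      set r2 : List Char := List.dropWhile p (c :: rest) with hr2d
      have hw : List.takeWhile p (c :: rest) = c :: wt := by
        rw [List.takeWhile_cons_of_pos (by simp [hp, hcb])]
      have hsplitcs : (c :: wt) ++ r2 = c :: rest := by
        rw [← hw, hr2d]; exact List.takeWhile_append_dropWhile
      have hwns : ∀ x ∈ c :: wt, PySem.Chars.isspace x = false := by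
        intro x hx
        rcases List.mem_cons.1 hx with h | h
        · subst h; exact hcb
        · have := List.mem_takeWhile_imp (l := rest) (p := p) (by rw [← hwt]; exact h)
          simpa [hp] using this
      have hr2 : r2 = [] ∨ ∃ d t, r2 = d :: t ∧ PySem.Chars.isspace d = true := by
        cases hr2c : r2 with
        | nil => exact Or.inl rfl
        | cons d t =>
          refine Or.inr ⟨d, t, rfl, ?_⟩
          have := dropWhile_head_false (p := p) (l := c :: rest) (by rw [← hr2d]; exact hr2c)
          simpa [hp] using this
      have hsplit0 : PySem.Chars.split₀ (c :: rest) = (c :: wt) :: PySem.Chars.split₀ r2 := by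
        rw [← hsplitcs]
        exact split₀_word (by simp) hwns hr2
      have hslen : s ≤ text.length := by
        have hL := congrArg List.length hdrop
        simp [List.length_drop] at hL
        omega
      have hdropw : text.drop s = sp ++ (c :: wt) ++ r2 := by
        rw [hdrop, ← hsplitcs]; simp
      have hfind : PySem.Chars.find (text.drop s) (c :: wt) = (sp.length : Int) := by
        rw [hdropw]
        exact find_space_word sp hsp c hcb wt r2
      have hff : PySem.Chars.findFrom text (c :: wt) (s : Int) = ((s + sp.length : Nat) : Int) := by
        rw [PySem.Chars.findFrom_natCast text (c :: wt) s hslen, hfind,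
          if_neg (by omega)]
        push_cast; ring
      rw [hsplit0]
      conv_lhs => unfold pvALoop
      simp only []
      rw [hff]
      conv_rhs => rw [← hsplitcs]
      rw [bscan_word pos c wt hwns r2 (s + sp.length) (i : Int)]
      split_ifs with hin
      · rfl
      · -- else branch
        have hK : ((s + sp.length : Nat) : Int) + ((c :: wt).length : Int)
            = ((s + sp.length + (c :: wt).length : Nat) : Int) := by push_cast; ring
        rw [hK]
        rcases hr2 with hnil | ⟨d, t, hdt, hd⟩
        · rw [hnil, split₀_nil]
          unfold pvALoop pvBScan
          simp only [if_neg (show ¬ ((i : Int) + 1 = 0) by omega)]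
        · rw [hdt] at hsplitcs
          rw [hdt, bscan_space pos hd, split₀_space_cons hd]
          have hdrop' : text.drop (s + sp.length + (c :: wt).length) = [d] ++ t := by
            have he : s + sp.length + (c :: wt).length = s + (sp.length + (c :: wt).length) := by
              omega
            rw [he, ← List.drop_drop, hdrop, ← hsplitcs]
            have : sp ++ ((c :: wt) ++ d :: t) = (sp ++ (c :: wt)) ++ d :: t := by simp
            rw [this]
            have hl : sp.length + (c :: wt).length = (sp ++ (c :: wt)).length := by simp
            rw [hl, List.drop_left]
            simp
          have ht : t.length < n := by
            have h5 := congrArg List.length hsplitcs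
            simp at h5 hlen
            omega
          have := ih t.length ht t rfl (s + sp.length + (c :: wt).length) [d] (i + 1)
            hdrop' (by intro x hx; simp at hx; subst hx; exact hd)
          have harg : (if i + 1 = 0 then (0 : Int) else ((i + 1 : Nat) : Int) - 1) = (i : Int) := by
            simp
          rw [harg] at this
          have hcast1 : (((i : Nat) + 1 : Nat) : Int) = (i : Int) + 1 := by push_cast; ring
          rw [hcast1] at this
          simp only [List.length_singleton] at this
          rw [this]

-- ===== VERDICT (by name: the statement is the Claim_ definition above) =====
theorem find_argument_unquoted_py_spec : Claim_equal_find_argument_unquoted_py := by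
  intro pos text _
  unfold Spec_find_argument_unquoted_py find_argument_unquoted_py find_argument_unquoted_py_alt
  have := pv_main pos text.toList text.toList.length text.toList rfl 0 [] 0 (by simp) (by simp)
  simpa using this
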